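-- pv_equiv track=rewrite | github.com/SilvesSun/learn-algorithm-in-python | dynamic programming/线性dp/1187_使数组严格递增.py | makeArrayIncreasing
-- ===== SOURCE A (Python) =====
-- import bisect
-- from typing import List
--
-- def makeArrayIncreasing(arr1: List[int], arr2: List[int]) -> int:
--     # 定义 f(i) 为使数组 arr1 的前 i+1 项（下标 0∼i）递增，且 保留 arr1[i] 的情况下的最小替换次数
--     # 为什么要不替换 arr1[i] 呢？因为如果替换，那么到底替换成哪个数，就得另加一个状态维护。可如果 arr1 的最后一项也要替换呢？我们可以在数组最后增加一个非常大的数，而这个数不替换即可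
--     # 首先将 arr2 从小到大排序，去重。
--     # 考虑 f(i)，由于我们不能替换 arr1[i]，那么我们考虑是否替换 arr1[i-1]（如果有）
--
--     # 1. 如果替换 arr1[i-1]
--     # arr1[i-1] 应当越大越好，但是不能等于或超过 arr1[i]。我们可以二分查找出 arr2 中第一个等于或超过 arr1[i] 的数 arr2[j]，然后将 arr1[i-1] 替换为 arr2[j-1]
--     # 我们可以继续考虑 arr1[i-2] （如果有），如果仍然想替换它，那么显然 arr2[j-1] 是不能再用了，应当选择更小一点的 arr2[j-2] （如果有）。以此类推，我们还可以继续把 arr1[i-3] 替换成 arr2[j-3]，等等等等，直到我们不想再替换。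
--
--     # 设已经替换了 k 个数而我们不想再替换了，那就意味着需要保留 arr1[i-k-1]，但这是有条件的，由于 arr1[i-k] 被替换成了 arr2[j-k]，故只有当 arr1[i-k-1]<arr2[j-k] 才可以保证序列递增。
--     # 若我们保留 arr1[i-k-1]，问题就可以被转化为 f(i−k−1)+k。
--
--     # 我们可以枚举 k 进行状态转移。显然 k 不能超过 j，也就是最多可供替换的 arr2 的数字个数；另外 k 也不能超过 i，也就是最多能被替换的 arr1 的数字个数。
--     # 但是有个问题，如果 k=i，那么 arr1[i-k-1]=arr1[-1] 是不存在的。解决方案是在 arr1 之前添加一个非常小的数（如 −1），然后令 k 不超过 i−1 即可。此时的 arr1[0] 充当了前面的 arr1[-1] 的作用。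
--
--     # 2. 如果不替换 arr1[i-1], 则需要满足 arr1[i-1] < arr1[i]，此时 f(i)=min(f(i),f(i−1))
--     # 我们在 arr1 的两侧加上哨兵： arr1 = [-1] + arr1 + [inf]
--
--     # 状态转移方程
--     # f(0) = 0
--     # f(i) = min(f(i-k-1) + k), i >= 1, 1 <=k <= min(i-1, j), arr1[i-k-1] < arr2[j-k]
--     # f(i) = min(f(i-1)), i >= 1, arr1[i-1] < arr1[i]
--
--     arr1 = [-1] + arr1 + [float('inf')]
--     arr2 =  sorted(set(arr2))
--
--     n = len(arr1)
--     dp = [float('inf')] * n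
--     dp[0] = 0
--     for i in range(1, n):
--         j = bisect.bisect_left(arr2, arr1[i])
--         for k in range(1, min(i-1, j) + 1):
--             if arr1[i-k-1] < arr2[j-k]:
--                 dp[i] = min(dp[i], dp[i-k-1] + k)
--         if arr1[i-1] < arr1[i]:
--             dp[i] = min(dp[i], dp[i-1])
--     return dp[-1] if dp[-1] != float('inf') else -1
-- ===== SOURCE B (Python) =====
-- import bisect
--
-- def makeArrayIncreasing(arr1, arr2):
--     # Count-indexed frontier DP (LIS-style): dp[c] is the smallest possible
--     # value of the last element of a strictly increasing version of the
--     # processed prefix that uses exactly c replacements (None if impossible),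
--     # with a virtual start value of -1.  Keeping the last value minimal for
--     # each replacement count is always at least as good, so the first index
--     # with a finite entry at the end is the answer.
--     vals = sorted(set(arr2))
--     dp = [-1]
--     for num in arr1:
--         ndp = []
--         for c in range(len(dp) + 1):
--             best = None
--             if c < len(dp) and dp[c] is not None and dp[c] < num:
--                 best = num
--             if c >= 1 and dp[c - 1] is not None:
--                 i = bisect.bisect_right(vals, dp[c - 1])
--                 if i < len(vals):
--                     v = vals[i]
--                     if best is None or v < best:
--                         best = v
--             ndp.append(best)
--         dp = ndp
--     for c, v in enumerate(dp):
--         if v is not None: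
--             return c
--     return -1
-- ===== Notes on version B (the rewrite author's own statement) =====
-- stated objective: alternative
-- what changed: A is a position-indexed DP (min replacements keeping arr1[i]) with -1/inf sentinels and a backward k-chain scan over the sorted-deduplicated arr2; B is a count-indexed frontier DP that maintains, per replacement count c, the smallest feasible last value (keep num if it exceeds dp[c], or replace with the smallest arr2 value above dp[c-1] via one bisect), returning the first count with a finite entry.
import Mathlib
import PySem

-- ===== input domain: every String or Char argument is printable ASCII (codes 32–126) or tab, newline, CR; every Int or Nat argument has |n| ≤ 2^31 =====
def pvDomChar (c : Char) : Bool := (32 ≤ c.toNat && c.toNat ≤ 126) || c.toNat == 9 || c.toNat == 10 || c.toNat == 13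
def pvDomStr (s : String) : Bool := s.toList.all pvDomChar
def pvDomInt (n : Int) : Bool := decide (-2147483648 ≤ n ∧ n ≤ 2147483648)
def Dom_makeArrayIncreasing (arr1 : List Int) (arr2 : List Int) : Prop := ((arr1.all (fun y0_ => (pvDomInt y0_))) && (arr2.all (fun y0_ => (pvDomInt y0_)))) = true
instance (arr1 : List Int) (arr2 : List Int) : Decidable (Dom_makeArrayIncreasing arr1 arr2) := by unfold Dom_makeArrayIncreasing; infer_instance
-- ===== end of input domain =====

-- B replaces A's position-indexed DP (min replacements keeping arr1[i], backward k-chain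
-- scan, -1/inf sentinels) by a count-indexed frontier DP: per replacement count, the
-- smallest feasible last value (objective: alternative, not faster).

-- ===== PORT A =====
-- Python's float('inf') occurs in A only as a sentinel compared against ints:
-- values are Option Int with none = +inf; pvInfLt is exactly Python's '<' on these values.
def pvInfLt : Option Int → Option Int → Bool
  | some a, some b => decide (a < b)
  | some _, none => true
  | none, _ => false

-- bisect.bisect_left(arr2, x) on the sorted deduplicated arr2, where x may be the +inf
-- sentinel (which inserts at the end); exact via PySem.List.bisectLeft on the sorted list.
def pvBisectInf (v : List Int) : Option Int → Nat
  | some x => PySem.List.bisectLeft v x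
  | none => v.length

-- Python's min where either side may be the float('inf') sentinel (none).
def pvMinO : Option Int → Option Int → Option Int
  | none, y => y
  | some b, none => some b
  | some b, some c => some (min b c)

-- one iteration of A's outer loop (i = i0+1): dp[i] is computed then appended
def pvStepA (a : List (Option Int)) (v : List Int) (dp : List (Option Int)) (i0 : Nat) : List (Option Int) :=
  let i := i0 + 1
  let j := pvBisectInf v (a.getD i none)
  let cur : Option Int :=
    (List.range (min (i - 1) j)).foldl (fun cur k0 =>
      let k := k0 + 1
      if pvInfLt (a.getD (i - k - 1) none) (some (v.getD (j - k) 0)) then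
        pvMinO cur ((dp.getD (i - k - 1) none).map (fun x => x + (k : Int)))
      else cur) none
  let cur := if pvInfLt (a.getD (i - 1) none) (a.getD i none) then pvMinO cur (dp.getD (i - 1) none) else cur
  dp ++ [cur]

def makeArrayIncreasing (arr1 : List Int) (arr2 : List Int) : Int :=
  let a : List (Option Int) := some (-1) :: (arr1.map some ++ [none])   -- [-1] + arr1 + [inf]
  let v : List Int := PySem.List.sorted (PySem.Set.ofList arr2) (fun x => x)  -- sorted(set(arr2))
  let n := a.length
  let dp : List (Option Int) := (List.range (n - 1)).foldl (pvStepA a v) [some 0]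
  match dp.getLast? with
  | some (some x) => x
  | _ => -1

-- ===== PORT B =====
-- one iteration of B's outer loop: dp[c] = smallest feasible last value using exactly
-- c replacements (none = impossible); per c, keep num or replace with the smallest
-- arr2 value above dp[c-1] (bisect_right), then append.
def pvStepC (vals : List Int) (dp : List (Option Int)) (num : Int) : List (Option Int) :=
  (List.range (dp.length + 1)).foldl (fun ndp c =>
    let best : Option Int :=
      if c < dp.length then
        match dp.getD c none with
        | some v => if v < num then some num else none
        | none => none
      else none
    let best : Option Int :=
      if 1 ≤ c then
        match dp.getD (c - 1) none with
        | some v =>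
          let i := PySem.List.bisectRight vals v
          if i < vals.length then
            let w := vals.getD i 0
            match best with
            | none => some w
            | some b => if w < b then some w else some b
          else best
        | none => best
      else best
    ndp ++ [best]) []

-- B's final scan: the first replacement count whose entry is feasible, else -1
def pvFirstSome : List (Option Int) → Int → Int
  | [], _ => -1
  | some _ :: _, c => c
  | none :: rest, c => pvFirstSome rest (c + 1)

def makeArrayIncreasing_alt (arr1 : List Int) (arr2 : List Int) : Int :=
  let vals : List Int := PySem.List.sorted (PySem.Set.ofList arr2) (fun x => x)  -- sorted(set(arr2))
  let dp : List (Option Int) := arr1.foldl (pvStepC vals) [some (-1)]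
  pvFirstSome dp 0

-- ===== PRECONDITION & SPEC =====
def Spec_makeArrayIncreasing (arr1 : List Int) (arr2 : List Int) (out : Int) : Prop := out = makeArrayIncreasing_alt arr1 arr2
instance (arr1 : List Int) (arr2 : List Int) (out : Int) : Decidable (Spec_makeArrayIncreasing arr1 arr2 out) := by unfold Spec_makeArrayIncreasing; infer_instance

-- ===== CLAIM (what is proved, stated in full; the proofs are below) =====
def Claim_equal_makeArrayIncreasing : Prop := ∀ (arr1 : List Int) (arr2 : List Int), Dom_makeArrayIncreasing arr1 arr2 → Spec_makeArrayIncreasing arr1 arr2 (makeArrayIncreasing arr1 arr2)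

-- ===== LEMMAS AND PROOFS =====

-- ---- proof-side: A's dp in "pairwise candidate" form (one candidate per previous kept position)
def pvStepB (a : List Int) (vals : List Int) (dp : List (Option Int)) (i0 : Nat) : List (Option Int) :=
  let i := i0 + 1
  let best : Option Int :=
    (List.range i).foldl (fun best p =>
      match dp.getD p none with
      | none => best
      | some c0 =>
        let g := i - p - 1
        let ok : Bool :=
          if g = 0 then decide (a.getD p 0 < a.getD i 0)
          else decide ((PySem.List.bisectLeft vals (a.getD i 0) : Int)
                        - (PySem.List.bisectRight vals (a.getD p 0) : Int) ≥ (g : Int))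
        if ok then
          let c := c0 + (g : Int)
          match best with
          | none => some c
          | some b => if c < b then some c else some b
        else best) none
  dp ++ [best]

def pvFinB (a : List Int) (vals : List Int) (dp : List (Option Int)) : Option Int :=
  let n := a.length
  (List.range n).foldl (fun ans p =>
    match dp.getD p none with
    | none => ans
    | some c0 =>
      let g := n - 1 - p
      if (vals.length : Int) - (PySem.List.bisectRight vals (a.getD p 0) : Int) ≥ (g : Int) then
        let c := c0 + (g : Int)
        match ans with
        | none => some c
        | some b => if c < b then some c else some b
      else ans) none

-- the canonical candidate for a transition ending at i with last kept position p
def pvCand (a v : List Int) (d : List (Option Int)) (j i p : Nat) : Option Int :=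
  let g := i - p - 1
  let ok : Prop := if g = 0 then a.getD p 0 < a.getD i 0
    else PySem.List.bisectRight v (a.getD p 0) + g ≤ j
  if _h : ok then (d.getD p none).map (fun x => x + (g : Int)) else none

theorem pvMinO_none_right (c : Option Int) : pvMinO c none = c := by cases c <;> rfl

theorem pvMinO_right_comm (c x y : Option Int) :
    pvMinO (pvMinO c x) y = pvMinO (pvMinO c y) x := by
  cases c <;> cases x <;> cases y <;> simp [pvMinO, min_comm, min_left_comm]

theorem pvMinO_match (best : Option Int) (c : Int) :
    (match best with
     | none => some c
     | some b => if c < b then some c else some b) = pvMinO best (some c) := by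
  cases best with
  | none => rfl
  | some b => simp only [pvMinO]; split_ifs with h <;> congr 1 <;> omega

theorem pvFold_none (l : List Nat) (G : Nat → Option Int) (c : Option Int)
    (h : ∀ x ∈ l, G x = none) :
    l.foldl (fun c k => pvMinO c (G k)) c = c := by
  induction l generalizing c with
  | nil => rfl
  | cons x t ih =>
    simp only [List.foldl_cons, h x (by simp)]
    rw [pvMinO_none_right]
    exact ih c (fun y hy => h y (by simp [hy]))

theorem pvMapRev (m : Nat) : (List.range m).map (fun k => m - 1 - k) = (List.range m).reverse := by
  induction m with
  | zero => rfl
  | succ m ih =>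
    conv_lhs => rw [List.range_succ_eq_map]
    conv_rhs => rw [List.range_succ]
    simp only [List.map_cons, List.map_map, List.reverse_append, List.reverse_cons,
      List.reverse_nil, List.nil_append, List.singleton_append]
    refine congrArg₂ _ (by omega) ?_
    rw [← ih]
    exact List.map_congr_left (fun k _ => by simp [Function.comp]; omega)

theorem pvFold_rev (m : Nat) (F : Nat → Option Int) (c : Option Int) :
    (List.range m).foldl (fun c k0 => pvMinO c (F (m - 1 - k0))) c
      = (List.range m).foldl (fun c p => pvMinO c (F p)) c := by
  have h1 : (List.range m).foldl (fun c k0 => pvMinO c (F (m - 1 - k0))) c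
      = ((List.range m).map (fun k => m - 1 - k)).foldl (fun c p => pvMinO c (F p)) c := by
    rw [List.foldl_map]
  rw [h1, pvMapRev]
  haveI : RightCommutative (fun (c : Option Int) (p : Nat) => pvMinO c (F p)) :=
    ⟨fun c x y => pvMinO_right_comm c (F x) (F y)⟩
  exact (List.reverse_perm (List.range m)).foldl_eq c

theorem pvChain (v : List Int) (hv : v.Pairwise (· ≤ ·)) (l : Int) (j k : Nat)
    (hj : j ≤ v.length) (hk : 1 ≤ k) :
    (k ≤ j ∧ l < v.getD (j - k) 0) ↔ PySem.List.bisectRight v l + k ≤ j := by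
  obtain ⟨hble, hlt, hge⟩ := PySem.List.bisectRight_spec v l hv
  constructor
  · rintro ⟨hkj, hl⟩
    have ht : j - k < v.length := by omega
    rw [List.getD_eq_getElem v 0 ht] at hl
    by_cases hbr : j - k < PySem.List.bisectRight v l
    · exact absurd hl (by have := hlt (j - k) ht hbr; omega)
    · omega
  · intro h
    have hkj : k ≤ j := by omega
    have ht : j - k < v.length := by omega
    refine ⟨hkj, ?_⟩
    rw [List.getD_eq_getElem v 0 ht]
    exact hge (j - k) ht (by omega)

-- getD on A's padded list
theorem pvGetA (a : List Int) (p : Nat) (hp : p < a.length) :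
    (a.map some ++ [(none : Option Int)]).getD p none = some (a.getD p 0) := by
  have hp' : p < (a.map some).length := by simpa using hp
  rw [List.getD_eq_getElem _ _ (by simp [List.length_append]; omega),
      List.getElem_append_left hp', List.getElem_map, List.getD_eq_getElem a 0 hp]

theorem pvGetATop (a : List Int) :
    (a.map some ++ [(none : Option Int)]).getD a.length none = none := by
  rw [List.getD_eq_getElem _ _ (by simp [List.length_append])]
  rw [List.getElem_append_right (by simp)]
  simp

theorem pvCand_gap (a v : List Int) (d : List (Option Int)) (j i p k : Nat)
    (hpk : i - p - 1 = k) (hk : k ≠ 0) :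
    pvCand a v d j i p = if PySem.List.bisectRight v (a.getD p 0) + k ≤ j then
      (d.getD p none).map (fun x => x + (k : Int)) else none := by
  simp only [pvCand, hpk]
  by_cases hc : PySem.List.bisectRight v (a.getD p 0) + k ≤ j
  · rw [dif_pos (by rw [if_neg hk]; exact hc), if_pos hc]
  · rw [dif_neg (by rw [if_neg hk]; exact hc), if_neg hc]

theorem pvCand_keep (a v : List Int) (d : List (Option Int)) (j i p : Nat)
    (hpk : i - p - 1 = 0) :
    pvCand a v d j i p = if a.getD p 0 < a.getD i 0 then d.getD p none else none := by
  simp only [pvCand, hpk]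
  by_cases hc : a.getD p 0 < a.getD i 0
  · rw [dif_pos (by simpa using hc), if_pos hc]
    simp
  · rw [dif_neg (by simpa using hc), if_neg hc]

-- A's inner k-scan equals the canonical fold over previous positions p < i-1 (gaps ≥ 1)
theorem pvAfold (a v : List Int) (hv : v.Pairwise (· ≤ ·)) (d : List (Option Int))
    (i j : Nat) (hj : j ≤ v.length) (hi : i ≤ a.length) :
    (List.range (min (i - 1) j)).foldl (fun cur k0 =>
        if pvInfLt ((a.map some ++ [(none : Option Int)]).getD (i - (k0 + 1) - 1) none)
            (some (v.getD (j - (k0 + 1)) 0)) then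
          pvMinO cur ((d.getD (i - (k0 + 1) - 1) none).map (fun x => x + ((k0 + 1 : Nat) : Int)))
        else cur) none
      = (List.range (i - 1)).foldl (fun c p => pvMinO c (pvCand a v d j i p)) none := by
  have hstep1 : (List.range (min (i - 1) j)).foldl (fun cur k0 =>
        if pvInfLt ((a.map some ++ [(none : Option Int)]).getD (i - (k0 + 1) - 1) none)
            (some (v.getD (j - (k0 + 1)) 0)) then
          pvMinO cur ((d.getD (i - (k0 + 1) - 1) none).map (fun x => x + ((k0 + 1 : Nat) : Int)))
        else cur) none
      = (List.range (min (i - 1) j)).foldl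
          (fun cur k0 => pvMinO cur (pvCand a v d j i (i - 1 - 1 - k0))) none := by
    apply PySem.List.foldl_congr_mem
    intro cur k0 hk0
    rw [List.mem_range] at hk0
    have hp : i - (k0 + 1) - 1 < a.length := by omega
    rw [show i - 1 - 1 - k0 = i - (k0 + 1) - 1 from by omega,
        pvCand_gap a v d j i (i - (k0 + 1) - 1) (k0 + 1) (by omega) (by omega)]
    have hcond := pvChain v hv (a.getD (i - (k0 + 1) - 1) 0) j (k0 + 1) hj (by omega)
    simp only [pvGetA a _ hp, pvInfLt]
    by_cases hc : PySem.List.bisectRight v (a.getD (i - (k0 + 1) - 1) 0) + (k0 + 1) ≤ j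
    · rw [if_pos hc, if_pos (by simpa using (hcond.mpr hc).2)]
    · rw [if_neg hc, pvMinO_none_right,
          if_neg (by simpa using fun h => hc (hcond.mp ⟨by omega, h⟩))]
  rw [hstep1]
  have hstep2 : (List.range (i - 1)).foldl
        (fun cur k0 => pvMinO cur (pvCand a v d j i (i - 1 - 1 - k0))) none
      = (List.range (min (i - 1) j)).foldl
          (fun cur k0 => pvMinO cur (pvCand a v d j i (i - 1 - 1 - k0))) none := by
    have hr : List.range (i - 1) = List.range (min (i - 1) j) ++
        List.map (fun x => min (i - 1) j + x) (List.range (i - 1 - min (i - 1) j)) := by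
      rw [← List.range_add]; congr 1; omega
    rw [hr, List.foldl_append, List.foldl_map]
    apply pvFold_none
    intro x hx
    rw [List.mem_range] at hx
    rw [pvCand_gap a v d j i (i - 1 - 1 - (min (i - 1) j + x)) (min (i - 1) j + x + 1)
        (by omega) (by omega)]
    rw [if_neg (by have := Nat.zero_le (PySem.List.bisectRight v
      (a.getD (i - 1 - 1 - (min (i - 1) j + x)) 0)); omega)]
  rw [hstep2.symm, pvFold_rev (i - 1) (pvCand a v d j i) none]

theorem pvMinO_ite (P : Prop) [Decidable P] (c X : Option Int) :
    (if P then pvMinO c X else c) = pvMinO c (if P then X else none) := by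
  split_ifs
  · rfl
  · rw [pvMinO_none_right]

theorem pvCand_none (a v : List Int) (d : List (Option Int)) (j i p : Nat)
    (hd : d.getD p none = none) : pvCand a v d j i p = none := by
  simp only [pvCand, hd]
  simp

theorem pvBodyB (a v : List Int) (d : List (Option Int)) (i p : Nat) (best : Option Int) :
    (match d.getD p none with
     | none => best
     | some c0 =>
       let g := i - p - 1
       let ok : Bool :=
         if g = 0 then decide (a.getD p 0 < a.getD i 0)
         else decide ((PySem.List.bisectLeft v (a.getD i 0) : Int)
                       - (PySem.List.bisectRight v (a.getD p 0) : Int) ≥ (g : Int))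
       if ok then
         let c := c0 + (g : Int)
         match best with
         | none => some c
         | some b => if c < b then some c else some b
       else best)
    = pvMinO best (pvCand a v d (PySem.List.bisectLeft v (a.getD i 0)) i p) := by
  cases hd : d.getD p none with
  | none => rw [pvCand_none a v d _ i p hd, pvMinO_none_right]
  | some c0 =>
    dsimp only
    by_cases hg : i - p - 1 = 0
    · rw [pvCand_keep a v d _ i p hg]
      simp only [hg]
      by_cases hlt : a.getD p 0 < a.getD i 0
      · rw [if_pos (by simpa using hlt), if_pos hlt, hd, pvMinO_match]
        simp
      · rw [if_neg (by simpa using hlt), if_neg hlt, pvMinO_none_right]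
    · rw [pvCand_gap a v d _ i p (i - p - 1) rfl hg]
      by_cases hc : PySem.List.bisectRight v (a.getD p 0) + (i - p - 1)
          ≤ PySem.List.bisectLeft v (a.getD i 0)
      · rw [if_neg hg, if_pos (by rw [decide_eq_true_eq]; omega), if_pos hc, hd, pvMinO_match]
        simp
      · rw [if_neg hg, if_neg (by rw [decide_eq_true_eq]; omega), if_neg hc, pvMinO_none_right]

theorem pvStepM (a v : List Int) (hv : v.Pairwise (· ≤ ·)) (d : List (Option Int))
    (i0 : Nat) (hi : i0 + 1 < a.length) :
    pvStepA (a.map some ++ [(none : Option Int)]) v d i0 = pvStepB a v d i0 := by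
  simp only [pvStepA, pvStepB]
  rw [pvGetA a (i0 + 1) hi]
  rw [show pvBisectInf v (some (a.getD (i0 + 1) 0))
        = PySem.List.bisectLeft v (a.getD (i0 + 1) 0) from rfl]
  simp only [pvAfold a v hv d (i0 + 1) (PySem.List.bisectLeft v (a.getD (i0 + 1) 0))
      (PySem.List.bisectLeft_spec v (a.getD (i0 + 1) 0) hv).1 (by omega)]
  simp only [Nat.add_sub_cancel]
  rw [pvGetA a i0 (by omega)]
  simp only [pvInfLt, decide_eq_true_eq]
  rw [pvMinO_ite]
  congr 1
  have hlast : (if a.getD i0 0 < a.getD (i0 + 1) 0 then d.getD i0 none else none)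
      = pvCand a v d (PySem.List.bisectLeft v (a.getD (i0 + 1) 0)) (i0 + 1) i0 :=
    (pvCand_keep a v d _ (i0 + 1) i0 (by omega)).symm
  rw [hlast]
  rw [PySem.List.foldl_congr_mem (List.range (i0 + 1)) _
        (fun c p => pvMinO c (pvCand a v d (PySem.List.bisectLeft v (a.getD (i0 + 1) 0)) (i0 + 1) p))
        none (fun best p _ => pvBodyB a v d (i0 + 1) p best),
      List.range_succ, List.foldl_append]
  rfl

theorem pvBodyF (a v : List Int) (d : List (Option Int)) (p : Nat)
    (hp : p + 1 < a.length) (ans : Option Int) :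
    (match d.getD p none with
     | none => ans
     | some c0 =>
       let g := a.length - 1 - p
       if (v.length : Int) - (PySem.List.bisectRight v (a.getD p 0) : Int) ≥ (g : Int) then
         let c := c0 + (g : Int)
         match ans with
         | none => some c
         | some b => if c < b then some c else some b
       else ans)
    = pvMinO ans (pvCand a v d v.length a.length p) := by
  cases hd : d.getD p none with
  | none => rw [pvCand_none a v d _ _ p hd, pvMinO_none_right]
  | some c0 =>
    dsimp only
    rw [pvCand_gap a v d v.length a.length p (a.length - 1 - p) (by omega) (by omega)]
    by_cases hc : PySem.List.bisectRight v (a.getD p 0) + (a.length - 1 - p) ≤ v.length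
    · rw [if_pos (by omega), if_pos hc, hd, pvMinO_match]
      simp
    · rw [if_neg (by omega), if_neg hc, pvMinO_none_right]

theorem pvStepF (a v : List Int) (hv : v.Pairwise (· ≤ ·)) (d : List (Option Int))
    (ha : 1 ≤ a.length) :
    pvStepA (a.map some ++ [(none : Option Int)]) v d (a.length - 1) = d ++ [pvFinB a v d] := by
  simp only [pvStepA, pvFinB]
  rw [show a.length - 1 + 1 = a.length from by omega]
  rw [show (a.map some ++ [(none : Option Int)]).getD a.length none = none from pvGetATop a]
  rw [show pvBisectInf v none = v.length from rfl]
  rw [pvAfold a v hv d a.length v.length (le_refl _) (le_refl _)]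
  rw [pvGetA a (a.length - 1) (by omega)]
  simp only [pvInfLt]
  rw [if_pos trivial]
  congr 1
  rw [show List.range a.length = List.range (a.length - 1) ++ [a.length - 1] from by
        rw [← List.range_succ]; congr 1; omega,
      List.foldl_append,
      PySem.List.foldl_congr_mem (List.range (a.length - 1)) _
        (fun c p => pvMinO c (pvCand a v d v.length a.length p)) none
        (fun ans p hp => pvBodyF a v d p (by rw [List.mem_range] at hp; omega) ans)]
  simp only [List.foldl_cons, List.foldl_nil]
  cases hd : d.getD (a.length - 1) none with
  | none => rw [pvMinO_none_right]
  | some c0 =>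
    dsimp only
    have hbr := (PySem.List.bisectRight_spec v (a.getD (a.length - 1) 0) hv).1
    rw [show a.length - 1 - (a.length - 1) = 0 from by omega]
    rw [if_pos (by omega), pvMinO_match]
    simp


-- ---- shared WithTop Int machinery (none = +infinity) ----
def pvW : Option Int → WithTop Int
  | none => ⊤
  | some x => (x : WithTop Int)

theorem pvW_min (x y : Option Int) : pvW (pvMinO x y) = pvW x ⊓ pvW y := by
  cases x with
  | none => cases y <;> simp [pvW, pvMinO]
  | some b =>
    cases y with
    | none => simp [pvW, pvMinO]
    | some c =>
      show ((min b c : Int) : WithTop Int) = min _ _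
      exact_mod_cast rfl

theorem pvW_top (o : Option Int) : pvW o = ⊤ ↔ o = none := by
  cases o <;> simp [pvW]

theorem pvFoldInf (n : Nat) (g : Nat → WithTop Int) (init : WithTop Int) :
    (List.range n).foldl (fun c p => c ⊓ g p) init = init ⊓ (Finset.range n).inf g := by
  induction n generalizing init with
  | zero => simp
  | succ n ih =>
    rw [List.range_succ, List.foldl_append, ih, Finset.range_add_one, Finset.inf_insert]
    simp only [List.foldl_cons, List.foldl_nil]
    rw [inf_comm (g n) _, inf_assoc]

theorem pvWfold (n : Nat) (F : Nat → Option Int) :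
    pvW ((List.range n).foldl (fun c p => pvMinO c (F p)) none)
      = (Finset.range n).inf (fun p => pvW (F p)) := by
  have h : ∀ (l : List Nat) (init : Option Int),
      pvW (l.foldl (fun c p => pvMinO c (F p)) init)
        = l.foldl (fun c p => c ⊓ pvW (F p)) (pvW init) := by
    intro l
    induction l with
    | nil => intro init; rfl
    | cons x t ih => intro init; simp only [List.foldl_cons, ih, pvW_min]
  rw [h, pvFoldInf]
  simp [pvW]

-- successor in the sorted distinct arr2 (smallest element strictly above), as Option / WithTop
def pvSuccO (v : List Int) : Option Int → Option Int
  | none => none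
  | some l =>
    if PySem.List.bisectRight v l < v.length then
      some (v.getD (PySem.List.bisectRight v l) 0)
    else none

def pvSuccW (v : List Int) (x : WithTop Int) : WithTop Int :=
  x.recTopCoe ⊤ (fun l => pvW (pvSuccO v (some l)))

theorem pvSuccW_W (v : List Int) (o : Option Int) : pvW (pvSuccO v o) = pvSuccW v (pvW o) := by
  cases o <;> rfl

theorem pvSorted_getD_le (v : List Int) (hv : v.Pairwise (· ≤ ·)) (i j : Nat)
    (hij : i ≤ j) (hj : j < v.length) : v.getD i 0 ≤ v.getD j 0 := by
  rcases Nat.lt_or_ge i j with h | h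
  · rw [List.getD_eq_getElem v 0 (by omega), List.getD_eq_getElem v 0 hj]
    exact List.pairwise_iff_getElem.mp hv i j (by omega) hj h
  · have : i = j := by omega
    simp [this]

theorem pvBR_mono (v : List Int) (hv : v.Pairwise (· ≤ ·)) (l l' : Int) (h : l ≤ l') :
    PySem.List.bisectRight v l ≤ PySem.List.bisectRight v l' := by
  obtain ⟨hble, hlt, _⟩ := PySem.List.bisectRight_spec v l hv
  obtain ⟨hble', _, hge'⟩ := PySem.List.bisectRight_spec v l' hv
  by_contra hcon
  have hi : PySem.List.bisectRight v l' < v.length := by omega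
  have h1 := hlt (PySem.List.bisectRight v l') hi (by omega)
  have h2 := hge' (PySem.List.bisectRight v l') hi (le_refl _)
  omega

theorem pvBR_self (v : List Int) (hv : v.Pairwise (· < ·)) (m : Nat) (hm : m < v.length) :
    PySem.List.bisectRight v (v.getD m 0) = m + 1 := by
  obtain ⟨hble, hlt, hge⟩ := PySem.List.bisectRight_spec v (v.getD m 0) (hv.imp le_of_lt)
  by_cases h1 : PySem.List.bisectRight v (v.getD m 0) ≤ m
  · have := hge m hm h1
    rw [List.getD_eq_getElem v 0 hm] at this
    omega
  · by_cases h2 : m + 2 ≤ PySem.List.bisectRight v (v.getD m 0)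
    · have hm1 : m + 1 < v.length := by omega
      have := hlt (m + 1) hm1 (by omega)
      have hst := List.pairwise_iff_getElem.mp hv m (m + 1) (by omega) hm1 (by omega)
      rw [List.getD_eq_getElem v 0 hm] at this
      omega
    · omega

theorem pvSuccW_mono (v : List Int) (hv : v.Pairwise (· ≤ ·)) (l l' : Int) (h : l ≤ l') :
    pvW (pvSuccO v (some l)) ≤ pvW (pvSuccO v (some l')) := by
  simp only [pvSuccO]
  by_cases h' : PySem.List.bisectRight v l' < v.length
  · have hle := pvBR_mono v hv l l' h
    rw [if_pos h', if_pos (by omega)]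
    simp only [pvW]
    exact_mod_cast pvSorted_getD_le v hv _ _ hle h'
  · rw [if_neg h']
    exact le_top

theorem pvSuccW_top (v : List Int) : pvSuccW v ⊤ = ⊤ := rfl

theorem pvSuccW_inf (v : List Int) (hv : v.Pairwise (· ≤ ·)) (x y : WithTop Int) :
    pvSuccW v (x ⊓ y) = pvSuccW v x ⊓ pvSuccW v y := by
  induction x using WithTop.recTopCoe with
  | top => simp [pvSuccW_top]
  | coe l =>
    induction y using WithTop.recTopCoe with
    | top => simp [pvSuccW_top]
    | coe l' =>
      rcases le_total l l' with h | h
      · have hmin : (l : WithTop Int) ⊓ (l' : WithTop Int) = (l : WithTop Int) := by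
          exact inf_eq_left.mpr (by exact_mod_cast h)
        rw [hmin]
        exact (min_eq_left (pvSuccW_mono v hv l l' h)).symm
      · have hmin : (l : WithTop Int) ⊓ (l' : WithTop Int) = (l' : WithTop Int) := by
          exact inf_eq_right.mpr (by exact_mod_cast h)
        rw [hmin]
        exact (min_eq_right (pvSuccW_mono v hv l' l h)).symm

-- generic inf computations over Finset.range
theorem pvInfIf (c : Nat) (p : Nat → Prop) [DecidablePred p] (x : WithTop Int) :
    (Finset.range (c+1)).inf (fun i => if p i then x else ⊤)
      = if ∃ i, i ≤ c ∧ p i then x else ⊤ := by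
  by_cases h : ∃ i, i ≤ c ∧ p i
  · obtain ⟨i, hic, hpi⟩ := h
    rw [if_pos ⟨i, hic, hpi⟩]
    refine le_antisymm ?_ ?_
    · calc (Finset.range (c+1)).inf (fun i => if p i then x else ⊤)
            ≤ (if p i then x else ⊤) := Finset.inf_le (by simp [Finset.mem_range]; omega)
        _ = x := if_pos hpi
    · refine Finset.le_inf (fun j _ => ?_)
      by_cases hj : p j
      · rw [if_pos hj]
      · rw [if_neg hj]; exact le_top
  · rw [if_neg h]
    rw [Finset.inf_eq_top_iff]
    intro j hj
    rw [Finset.mem_range] at hj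
    rw [if_neg (fun hpj => h ⟨j, by omega, hpj⟩)]

theorem pvInfHom (F : WithTop Int → WithTop Int) (hF1 : F ⊤ = ⊤)
    (hF2 : ∀ x y, F (x ⊓ y) = F x ⊓ F y) (n : Nat) (G : Nat → WithTop Int) :
    (Finset.range n).inf (fun i => F (G i)) = F ((Finset.range n).inf G) := by
  induction n with
  | zero =>
    rw [show (Finset.range 0).inf (fun i => F (G i)) = ⊤ from rfl,
        show (Finset.range 0).inf G = ⊤ from rfl, hF1]
  | succ n ih => rw [Finset.range_add_one, Finset.inf_insert, Finset.inf_insert, ih, hF2]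

theorem pvInfPointwise (n : Nat) (f g : Nat → WithTop Int) :
    (Finset.range n).inf (fun i => f i ⊓ g i)
      = (Finset.range n).inf f ⊓ (Finset.range n).inf g := by
  induction n with
  | zero => simp
  | succ n ih =>
    rw [Finset.range_add_one, Finset.inf_insert, Finset.inf_insert, Finset.inf_insert, ih]
    rw [inf_inf_inf_comm]

theorem pvInfShift (F : WithTop Int → WithTop Int) (hF1 : F ⊤ = ⊤)
    (hF2 : ∀ x y, F (x ⊓ y) = F x ⊓ F y) (G : Nat → WithTop Int) (c : Nat) :
    (Finset.range (c+1)).inf (fun c' => if 1 ≤ c' then F (G (c'-1)) else ⊤)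
      = if 1 ≤ c then F ((Finset.range c).inf G) else ⊤ := by
  induction c with
  | zero => simp
  | succ c ih =>
    rw [Finset.range_add_one, Finset.inf_insert, ih]
    by_cases hc : 1 ≤ c
    · rw [if_pos hc, if_pos (by omega), if_pos (by omega)]
      rw [Finset.range_add_one, Finset.inf_insert, hF2]
      simp only [Nat.add_sub_cancel]
    · have hc0 : c = 0 := by omega
      subst hc0
      simp [hF1]

-- ---- the canonical-candidate function C and prefix minima ----
def pvKey (v : List Int) (l : Int) : Nat → Option Int
  | 0 => some l
  | g+1 => pvSuccO v (pvKey v l g)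

def pvDP (a v : List Int) (t : Nat) : List (Option Int) :=
  (List.range t).foldl (pvStepB a v) [some 0]

def pvOps (d : List (Option Int)) (t p : Nat) : Option Int :=
  (d.getD p none).map (fun x => x + ((t - p : Nat) : Int))

def pvContrib (v a : List Int) (d : List (Option Int)) (t c p : Nat) : WithTop Int :=
  if pvOps d t p = some (c : Int) then pvW (pvKey v (a.getD p 0) (t - p)) else ⊤

def pvC (v a : List Int) (d : List (Option Int)) (t c : Nat) : WithTop Int :=
  (Finset.range (t+1)).inf (pvContrib v a d t c)

def pvPmC (v a : List Int) (d : List (Option Int)) (t c : Nat) : WithTop Int :=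
  (Finset.range (c+1)).inf (pvC v a d t)

def pvPmB (L : List (Option Int)) (c : Nat) : WithTop Int :=
  (Finset.range (c+1)).inf (fun c' => pvW (L.getD c' none))

def pvFNew (a v : List Int) (d : List (Option Int)) (t : Nat) : Option Int :=
  (List.range (t+1)).foldl (fun c p =>
    pvMinO c (pvCand a v d (PySem.List.bisectLeft v (a.getD (t+1) 0)) (t+1) p)) none

def pvDB (v : List Int) (arr : List Int) : Nat → List (Option Int)
  | 0 => [some (-1)]
  | t+1 => pvStepC v (pvDB v arr t) (arr.getD t 0)

theorem pvStepB_eq (a v : List Int) (d : List (Option Int)) (i0 : Nat) :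
    pvStepB a v d i0 = d ++ [pvFNew a v d i0] := by
  simp only [pvStepB, pvFNew]
  congr 1
  rw [PySem.List.foldl_congr_mem (List.range (i0+1)) _
        (fun c p => pvMinO c (pvCand a v d (PySem.List.bisectLeft v (a.getD (i0+1) 0)) (i0+1) p))
        none (fun best p _ => pvBodyB a v d (i0 + 1) p best)]

theorem pvDP_succ (a v : List Int) (t : Nat) :
    pvDP a v (t+1) = pvDP a v t ++ [pvFNew a v (pvDP a v t) t] := by
  simp only [pvDP]
  rw [List.range_succ, List.foldl_append]
  simp only [List.foldl_cons, List.foldl_nil]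
  exact pvStepB_eq a v _ t

theorem pvDP_len (a v : List Int) (t : Nat) : (pvDP a v t).length = t + 1 := by
  induction t with
  | zero => rfl
  | succ t ih =>
    rw [pvDP_succ, List.length_append, ih]
    rfl

theorem pvDP_getD_stable (a v : List Int) (t p : Nat) (hp : p ≤ t) :
    (pvDP a v (t+1)).getD p none = (pvDP a v t).getD p none := by
  rw [pvDP_succ]
  rw [List.getD_append _ _ _ _ (by rw [pvDP_len]; omega)]

theorem pvDP_getD_last (a v : List Int) (t : Nat) :
    (pvDP a v (t+1)).getD (t+1) none = pvFNew a v (pvDP a v t) t := by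
  rw [pvDP_succ]
  have h : t + 1 = (pvDP a v t).length := by rw [pvDP_len]
  rw [h, List.getD_append_right _ _ _ _ (le_refl _)]
  simp

-- every stored value o at index p satisfies 0 ≤ o ≤ p
theorem pvFold_bound (l : List Nat) (F : Nat → Option Int) (Q : Int → Prop)
    (hmin : ∀ y z, Q y → Q z → Q (min y z))
    (hF : ∀ p ∈ l, ∀ y, F p = some y → Q y) :
    ∀ (init : Option Int), (∀ y, init = some y → Q y) →
      ∀ y, l.foldl (fun c p => pvMinO c (F p)) init = some y → Q y := by
  induction l with
  | nil => intro init hinit y hy; exact hinit y hy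
  | cons x t ih =>
    intro init hinit y hy
    refine ih (fun p hp => hF p (by simp [hp])) (pvMinO init (F x)) ?_ y hy
    intro z hz
    cases hi : init with
    | none =>
      rw [hi] at hz
      simp only [pvMinO] at hz
      exact hF x (by simp) z hz
    | some b =>
      cases hfx : F x with
      | none => rw [hi, hfx] at hz; simp only [pvMinO] at hz; exact hinit z (by rw [hi, hz])
      | some c =>
        rw [hi, hfx] at hz
        simp only [pvMinO, Option.some.injEq] at hz
        subst hz
        exact hmin b c (hinit b hi) (hF x (by simp) c hfx)

theorem pvDP_bound (a v : List Int) (t : Nat) :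
    ∀ p y, (pvDP a v t).getD p none = some y → 0 ≤ y ∧ y ≤ (p : Int) := by
  induction t with
  | zero =>
    intro p y hy
    match p, hy with
    | 0, hy => simp only [pvDP, List.range_zero, List.foldl_nil, List.getD] at hy; simp at hy; omega
    | p+1, hy => simp [pvDP, List.getD] at hy
  | succ t ih =>
    intro p y hy
    by_cases hp : p ≤ t
    · rw [pvDP_getD_stable a v t p hp] at hy
      exact ih p y hy
    · by_cases hp2 : p ≤ t + 1
      · have hpe : p = t + 1 := by omega
        subst hpe
        rw [pvDP_getD_last] at hy
        have := pvFold_bound (List.range (t+1))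
          (fun p => pvCand a v (pvDP a v t) (PySem.List.bisectLeft v (a.getD (t+1) 0)) (t+1) p)
          (fun z => 0 ≤ z ∧ z ≤ (t : Int))
          (fun y z hy hz => by constructor <;> [exact le_min hy.1 hz.1; exact le_trans (min_le_left _ _) hy.2])
          ?_ none (by intro y h; cases h) y hy
        · omega
        · intro p hp' z hz
          rw [List.mem_range] at hp'
          have key : ∃ o, (pvDP a v t).getD p none = some o
              ∧ o + (((t+1) - p - 1 : Nat) : Int) = z := by
            simp only [pvCand] at hz
            split at hz <;>
            · split at hz
              · cases hd : (pvDP a v t).getD p none with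
                | none => rw [hd] at hz; simp at hz
                | some o => rw [hd] at hz; exact ⟨o, rfl, by simpa using hz⟩
              · exact absurd hz (by simp)
          obtain ⟨o, hd, hzz⟩ := key
          have hb := ih p o hd
          have hcast : (((t+1) - p - 1 : Nat) : Int) = (t : Int) - p := by omega
          omega
      · rw [List.getD_eq_default _ _ (by rw [pvDP_len]; omega)] at hy
        cases hy

-- closed form of the canonical key chain
theorem pvKey_eq (v : List Int) (hv : v.Pairwise (· < ·)) (l : Int) (g : Nat) (hg : 1 ≤ g) :
    pvKey v l g = if PySem.List.bisectRight v l + g ≤ v.length then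
      some (v.getD (PySem.List.bisectRight v l + g - 1) 0) else none := by
  induction g with
  | zero => omega
  | succ g ih =>
    by_cases h0 : g ≤ 0
    · have : g = 0 := by omega
      subst this
      simp only [pvKey, pvSuccO]
      split_ifs with h1 h2 h2 <;> try rfl
      · omega
      · omega
    · rw [show pvKey v l (g+1) = pvSuccO v (pvKey v l g) from rfl, ih (by omega)]
      by_cases h1 : PySem.List.bisectRight v l + g ≤ v.length
      · rw [if_pos h1]
        simp only [pvSuccO]
        have hm : PySem.List.bisectRight v l + g - 1 < v.length := by omega
        rw [pvBR_self v hv _ hm]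
        by_cases h2 : PySem.List.bisectRight v l + (g+1) ≤ v.length
        · rw [if_pos (by omega), if_pos h2]
          congr 1
          congr 1
          omega
        · rw [if_neg (by omega), if_neg h2]
      · rw [if_neg h1]
        simp only [pvSuccO]
        rw [if_neg (by omega)]


-- ---- B's step as a per-index formula ----
def pvKeep (o : Option Int) (num : Int) : Option Int :=
  match o with
  | some x => if x < num then some num else none
  | none => none

theorem pvW_keep (o : Option Int) (num : Int) :
    pvW (pvKeep o num) = if pvW o < (num : WithTop Int) then (num : WithTop Int) else ⊤ := by
  cases o with
  | none => simp [pvKeep, pvW]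
  | some x =>
    have hiff : pvW (some x) < (num : WithTop Int) ↔ x < num := by simp [pvW]
    by_cases h : x < num
    · rw [show pvKeep (some x) num = some num from by simp [pvKeep, h], if_pos (hiff.mpr h)]
      rfl
    · rw [show pvKeep (some x) num = none from by simp [pvKeep, h],
          if_neg (fun hc => h (hiff.mp hc))]
      rfl

theorem pvRepl (v : List Int) (o best : Option Int) :
    (match o with
     | some w0 =>
       if PySem.List.bisectRight v w0 < v.length then
         match best with
         | none => some (v.getD (PySem.List.bisectRight v w0) 0)
         | some b => if v.getD (PySem.List.bisectRight v w0) 0 < b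
             then some (v.getD (PySem.List.bisectRight v w0) 0) else some b
       else best
     | none => best)
    = pvMinO best (pvSuccO v o) := by
  cases o with
  | none => exact (pvMinO_none_right best).symm
  | some w0 =>
    simp only [pvSuccO]
    by_cases h : PySem.List.bisectRight v w0 < v.length
    · rw [if_pos h, if_pos h, pvMinO_match]
    · rw [if_neg h, if_neg h, pvMinO_none_right]

theorem pvFoldAppendMap {α β : Type} (l : List α) (f : α → β) (init : List β) :
    l.foldl (fun acc x => acc ++ [f x]) init = init ++ l.map f := by
  induction l generalizing init with
  | nil => simp
  | cons x t ih => simp [ih]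

theorem pvStepC_eq (v : List Int) (dp : List (Option Int)) (num : Int) :
    pvStepC v dp num = (List.range (dp.length + 1)).map (fun c =>
      pvMinO (pvKeep (dp.getD c none) num)
        (if 1 ≤ c then pvSuccO v (dp.getD (c-1) none) else none)) := by
  simp only [pvStepC]
  rw [pvFoldAppendMap]
  rw [List.nil_append]
  refine List.map_congr_left (fun c hc => ?_)
  rw [List.mem_range] at hc
  have h1 : (if c < dp.length then
      (match dp.getD c none with
       | some v => if v < num then some num else none
       | none => none)
      else none) = pvKeep (dp.getD c none) num := by
    by_cases h : c < dp.length
    · rw [if_pos h]; rfl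
    · rw [if_neg h, List.getD_eq_default _ _ (by omega)]; rfl
  rw [h1]
  by_cases h2 : 1 ≤ c
  · rw [if_pos h2, if_pos h2]
    exact pvRepl v (dp.getD (c-1) none) _
  · rw [if_neg h2, if_neg h2, pvMinO_none_right]

theorem pvMapRangeGetD {β : Type} (n : Nat) (f : Nat → Option β) (c : Nat) :
    ((List.range n).map f).getD c none = if c < n then f c else none := by
  by_cases h : c < n
  · rw [if_pos h, List.getD_eq_getElem _ _ (by simpa using h)]
    simp
  · rw [if_neg h, List.getD_eq_default _ _ (by simpa using by omega)]

theorem pvNewGetD (v : List Int) (dp : List (Option Int)) (num : Int) (c : Nat) :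
    pvW ((pvStepC v dp num).getD c none)
      = (if pvW (dp.getD c none) < (num : WithTop Int) then (num : WithTop Int) else ⊤)
        ⊓ (if 1 ≤ c then pvSuccW v (pvW (dp.getD (c-1) none)) else ⊤) := by
  rw [pvStepC_eq, pvMapRangeGetD]
  by_cases h : c < dp.length + 1
  · rw [if_pos h, pvW_min, pvW_keep]
    congr 1
    by_cases h2 : 1 ≤ c
    · rw [if_pos h2, if_pos h2, pvSuccW_W]
    · rw [if_neg h2, if_neg h2]; rfl
  · rw [if_neg h]
    have hc : dp.getD c none = none := List.getD_eq_default _ _ (by omega)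
    have hc1 : dp.getD (c-1) none = none := List.getD_eq_default _ _ (by omega)
    rw [hc, hc1]
    rw [if_neg (by simp [pvW]), if_pos (by omega)]
    show ⊤ = ⊤ ⊓ pvSuccW v ⊤
    rw [pvSuccW_top]
    simp

theorem pvPmB_step (v : List Int) (hv : v.Pairwise (· ≤ ·)) (dp : List (Option Int))
    (num : Int) (c : Nat) :
    pvPmB (pvStepC v dp num) c
      = (if pvPmB dp c < (num : WithTop Int) then (num : WithTop Int) else ⊤)
        ⊓ (if 1 ≤ c then pvSuccW v (pvPmB dp (c-1)) else ⊤) := by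
  unfold pvPmB
  rw [Finset.inf_congr rfl (fun c' _ => pvNewGetD v dp num c'), pvInfPointwise]
  congr 1
  · rw [pvInfIf c (fun i => pvW (dp.getD i none) < (num : WithTop Int)) (num : WithTop Int)]
    congr 1
    rw [eq_iff_iff, Finset.inf_lt_iff]
    constructor
    · rintro ⟨b, hb, h⟩; exact ⟨b, by rw [Finset.mem_range]; omega, h⟩
    · rintro ⟨b, hb, h⟩; rw [Finset.mem_range] at hb; exact ⟨b, by omega, h⟩
  · refine (pvInfShift (pvSuccW v) (pvSuccW_top v) (pvSuccW_inf v hv)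
        (fun j => pvW (dp.getD j none)) c).trans ?_
    by_cases h : 1 ≤ c
    · rw [if_pos h, if_pos h, show c - 1 + 1 = c from by omega]
    · rw [if_neg h, if_neg h]

-- ---- C's step ----
theorem pvMap0 (o : Option Int) : o.map (fun x => x + ((0 : Nat) : Int)) = o := by
  cases o <;> simp

theorem pvContrib_step (v a : List Int) (t c p : Nat) (hp : p ≤ t) :
    pvContrib v a (pvDP a v (t+1)) (t+1) c p
      = if 1 ≤ c then pvSuccW v (pvContrib v a (pvDP a v t) t (c-1) p) else ⊤ := by
  unfold pvContrib pvOps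
  rw [pvDP_getD_stable a v t p hp]
  have hgap : t + 1 - p = (t - p) + 1 := by omega
  rw [hgap]
  cases hd : (pvDP a v t).getD p none with
  | none =>
    simp only [Option.map_none]
    rw [if_neg (by simp)]
    by_cases h2 : 1 ≤ c
    · rw [if_pos h2, if_neg (by simp), pvSuccW_top]
    · rw [if_neg h2]
  | some o =>
    have hb := pvDP_bound a v t p o hd
    simp only [Option.map_some]
    by_cases h2 : 1 ≤ c
    · rw [if_pos h2]
      by_cases hg : o + (((t - p) + 1 : Nat) : Int) = (c : Int)
      · rw [if_pos (by rw [Option.some.injEq]; exact hg),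
            if_pos (by rw [Option.some.injEq]; push_cast at hg ⊢; omega)]
        rw [show pvKey v (a.getD p 0) ((t-p)+1) = pvSuccO v (pvKey v (a.getD p 0) (t-p)) from rfl]
        rw [pvSuccW_W]
      · rw [if_neg (by rw [Option.some.injEq]; exact hg),
            if_neg (by rw [Option.some.injEq]; push_cast at hg ⊢; omega), pvSuccW_top]
    · rw [if_neg h2]
      have hc0 : c = 0 := by omega
      subst hc0
      rw [if_neg (by rw [Option.some.injEq]; push_cast; omega)]

theorem pvContrib_last (v a : List Int) (t c : Nat) :
    pvContrib v a (pvDP a v (t+1)) (t+1) c (t+1)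
      = if pvFNew a v (pvDP a v t) t = some (c : Int)
        then ((a.getD (t+1) 0 : Int) : WithTop Int) else ⊤ := by
  unfold pvContrib pvOps
  rw [pvDP_getD_last]
  rw [show t + 1 - (t + 1) = 0 from by omega, pvMap0]
  rfl

theorem pvInfTop (n : Nat) : (Finset.range n).inf (fun (_ : Nat) => (⊤ : WithTop Int)) = ⊤ := by
  rw [Finset.inf_eq_top_iff]
  intro s _
  rfl

theorem pvC_step (v a : List Int) (hv : v.Pairwise (· ≤ ·)) (t c : Nat) :
    pvC v a (pvDP a v (t+1)) (t+1) c
      = (if pvFNew a v (pvDP a v t) t = some (c : Int)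
          then ((a.getD (t+1) 0 : Int) : WithTop Int) else ⊤)
        ⊓ (if 1 ≤ c then pvSuccW v (pvC v a (pvDP a v t) t (c-1)) else ⊤) := by
  unfold pvC
  rw [show t + 1 + 1 = (t + 1) + 1 from rfl, Finset.range_add_one, Finset.inf_insert,
      pvContrib_last]
  congr 1
  rw [Finset.inf_congr rfl (fun p hp => pvContrib_step v a t c p
        (by rw [Finset.mem_range] at hp; omega))]
  by_cases h : 1 ≤ c
  · simp only [if_pos h]
    exact pvInfHom (pvSuccW v) (pvSuccW_top v) (pvSuccW_inf v hv) (t+1) _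
  · simp only [if_neg h]
    exact pvInfTop (t+1)

theorem pvPmC_step (v a : List Int) (hv : v.Pairwise (· ≤ ·)) (t c : Nat) :
    pvPmC v a (pvDP a v (t+1)) (t+1) c
      = (if (∃ c', c' ≤ c ∧ pvFNew a v (pvDP a v t) t = some ((c' : Nat) : Int))
          then ((a.getD (t+1) 0 : Int) : WithTop Int) else ⊤)
        ⊓ (if 1 ≤ c then pvSuccW v (pvPmC v a (pvDP a v t) t (c-1)) else ⊤) := by
  unfold pvPmC
  rw [Finset.inf_congr rfl (fun c' _ => pvC_step v a hv t c'), pvInfPointwise]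
  congr 1
  · exact pvInfIf c (fun c' => pvFNew a v (pvDP a v t) t = some ((c' : Nat) : Int)) _
  · refine (pvInfShift (pvSuccW v) (pvSuccW_top v) (pvSuccW_inf v hv)
        (pvC v a (pvDP a v t) t) c).trans ?_
    by_cases h : 1 ≤ c
    · rw [if_pos h, if_pos h, show c - 1 + 1 = c from by omega]
    · rw [if_neg h, if_neg h]


-- ---- linking A's candidates to the canonical key chain ----
theorem pvBL_lt (v : List Int) (hv : v.Pairwise (· ≤ ·)) (x : Int) (m : Nat) (hm : m < v.length) :
    v.getD m 0 < x ↔ m < PySem.List.bisectLeft v x := by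
  obtain ⟨hble, hlt, hge⟩ := PySem.List.bisectLeft_spec v x hv
  rw [List.getD_eq_getElem v 0 hm]
  constructor
  · intro h
    by_contra hc
    have := hge m hm (by omega)
    omega
  · intro h
    exact hlt m hm h

theorem pvCandKey (v a : List Int) (hv : v.Pairwise (· < ·)) (d : List (Option Int))
    (t p : Nat) (hp : p ≤ t) :
    pvCand a v d (PySem.List.bisectLeft v (a.getD (t+1) 0)) (t+1) p
      = if ∃ k, pvKey v (a.getD p 0) (t-p) = some k ∧ k < a.getD (t+1) 0
        then (d.getD p none).map (fun x => x + ((t - p : Nat) : Int)) else none := by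
  have hvle := hv.imp (fun h => le_of_lt h)
  by_cases hg : t - p = 0
  · rw [pvCand_keep a v d _ (t+1) p (by omega), hg]
    have hiff : (∃ k, pvKey v (a.getD p 0) 0 = some k ∧ k < a.getD (t+1) 0)
        ↔ a.getD p 0 < a.getD (t+1) 0 := by
      constructor
      · rintro ⟨k, hk, hklt⟩
        have : k = a.getD p 0 := by simpa [pvKey] using hk.symm
        rwa [this] at hklt
      · intro h
        exact ⟨a.getD p 0, rfl, h⟩
    by_cases h : a.getD p 0 < a.getD (t+1) 0
    · rw [if_pos h, if_pos (hiff.mpr h)]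
      exact (pvMap0 _).symm
    · rw [if_neg h, if_neg (fun hx => h (hiff.mp hx))]
  · rw [pvCand_gap a v d _ (t+1) p (t-p) (by omega) hg, pvKey_eq v hv _ (t-p) (by omega)]
    have hiff : (PySem.List.bisectRight v (a.getD p 0) + (t-p)
          ≤ PySem.List.bisectLeft v (a.getD (t+1) 0))
        ↔ (∃ k, (if PySem.List.bisectRight v (a.getD p 0) + (t-p) ≤ v.length
            then some (v.getD (PySem.List.bisectRight v (a.getD p 0) + (t-p) - 1) 0)
            else none) = some k ∧ k < a.getD (t+1) 0) := by
      have hble := (PySem.List.bisectLeft_spec v (a.getD (t+1) 0) hvle).1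
      constructor
      · intro h
        rw [if_pos (by omega)]
        refine ⟨_, rfl, ?_⟩
        exact (pvBL_lt v hvle _ _ (by omega)).mpr (by omega)
      · rintro ⟨k, hk, hklt⟩
        split at hk
        · next hlen =>
          rw [Option.some.injEq] at hk
          rw [← hk] at hklt
          have := (pvBL_lt v hvle _ _ (by omega : PySem.List.bisectRight v (a.getD p 0)
              + (t-p) - 1 < v.length)).mp hklt
          omega
        · exact absurd hk (by simp)
    by_cases h : PySem.List.bisectRight v (a.getD p 0) + (t-p)
        ≤ PySem.List.bisectLeft v (a.getD (t+1) 0)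
    · rw [if_pos h, if_pos (hiff.mp h)]
    · rw [if_neg h, if_neg (fun hx => h (hiff.mpr hx))]

theorem pvKeepLink (v a : List Int) (hv : v.Pairwise (· < ·)) (t c : Nat) :
    (∃ c', c' ≤ c ∧ pvFNew a v (pvDP a v t) t = some ((c' : Nat) : Int))
      ↔ pvPmC v a (pvDP a v t) t c < ((a.getD (t+1) 0 : Int) : WithTop Int) := by
  have hW : pvW (pvFNew a v (pvDP a v t) t)
      = (Finset.range (t+1)).inf (fun p => pvW (pvCand a v (pvDP a v t)
          (PySem.List.bisectLeft v (a.getD (t+1) 0)) (t+1) p)) := pvWfold (t+1) _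
  constructor
  · rintro ⟨c', hc', hf⟩
    obtain ⟨p, hpmem, hpeq⟩ := Finset.exists_mem_eq_inf (Finset.range (t+1)) ⟨0, by simp⟩
        (fun p => pvW (pvCand a v (pvDP a v t)
          (PySem.List.bisectLeft v (a.getD (t+1) 0)) (t+1) p))
    rw [Finset.mem_range] at hpmem
    have heq : pvW (pvCand a v (pvDP a v t)
        (PySem.List.bisectLeft v (a.getD (t+1) 0)) (t+1) p) = (((c' : Nat) : Int) : WithTop Int) := by
      rw [← hpeq, ← hW, hf]
      rfl
    rw [pvCandKey v a hv _ t p (by omega)] at heq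
    by_cases hgd : ∃ k, pvKey v (a.getD p 0) (t-p) = some k ∧ k < a.getD (t+1) 0
    · rw [if_pos hgd] at heq
      obtain ⟨k, hk, hklt⟩ := hgd
      cases hd : (pvDP a v t).getD p none with
      | none =>
        rw [hd] at heq
        exact absurd heq (by simp [pvW])
      | some o =>
        rw [hd] at heq
        have hoc : o + ((t - p : Nat) : Int) = ((c' : Nat) : Int) := by
          have h2 : ((o + ((t - p : Nat) : Int) : Int) : WithTop Int)
              = (((c' : Nat) : Int) : WithTop Int) := heq
          exact_mod_cast h2
        have hcon : pvContrib v a (pvDP a v t) t c' p = pvW (pvKey v (a.getD p 0) (t-p)) := by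
          unfold pvContrib pvOps
          rw [hd, if_pos (by rw [Option.map_some, Option.some.injEq]; exact hoc)]
        calc pvPmC v a (pvDP a v t) t c
            ≤ pvC v a (pvDP a v t) t c' := Finset.inf_le (by rw [Finset.mem_range]; omega)
          _ ≤ pvContrib v a (pvDP a v t) t c' p := Finset.inf_le (by rw [Finset.mem_range]; omega)
          _ = pvW (pvKey v (a.getD p 0) (t-p)) := hcon
          _ = ((k : Int) : WithTop Int) := by rw [hk]; rfl
          _ < ((a.getD (t+1) 0 : Int) : WithTop Int) := by exact_mod_cast hklt
    · rw [if_neg hgd] at heq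
      exact absurd heq (by simp [pvW])
  · intro h
    obtain ⟨c', hc'mem, hc'⟩ := Finset.inf_lt_iff.mp h
    rw [Finset.mem_range] at hc'mem
    obtain ⟨p, hpmem, hp⟩ := Finset.inf_lt_iff.mp hc'
    rw [Finset.mem_range] at hpmem
    unfold pvContrib at hp
    split at hp
    · next hops =>
      cases hk : pvKey v (a.getD p 0) (t - p) with
      | none =>
        rw [hk] at hp
        exact absurd hp (by simp [pvW])
      | some k =>
        rw [hk] at hp
        have hklt : k < a.getD (t+1) 0 := by
          have : ((k : Int) : WithTop Int) < ((a.getD (t+1) 0 : Int) : WithTop Int) := hp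
          exact_mod_cast this
        have hK : pvCand a v (pvDP a v t) (PySem.List.bisectLeft v (a.getD (t+1) 0)) (t+1) p
            = some ((c' : Nat) : Int) := by
          rw [pvCandKey v a hv _ t p (by omega), if_pos ⟨k, hk, hklt⟩]
          exact hops
        have hle : pvW (pvFNew a v (pvDP a v t) t) ≤ (((c' : Nat) : Int) : WithTop Int) := by
          rw [hW]
          calc (Finset.range (t+1)).inf (fun p => pvW (pvCand a v (pvDP a v t)
                (PySem.List.bisectLeft v (a.getD (t+1) 0)) (t+1) p))
              ≤ pvW (pvCand a v (pvDP a v t)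
                (PySem.List.bisectLeft v (a.getD (t+1) 0)) (t+1) p) :=
                Finset.inf_le (by rw [Finset.mem_range]; omega)
            _ = (((c' : Nat) : Int) : WithTop Int) := by rw [hK]; rfl
        cases hf : pvFNew a v (pvDP a v t) t with
        | none =>
          rw [hf] at hle
          exact absurd hle (by simp [pvW])
        | some x =>
          rw [hf] at hle
          have hxle : x ≤ ((c' : Nat) : Int) := by
            have : ((x : Int) : WithTop Int) ≤ (((c' : Nat) : Int) : WithTop Int) := hle
            exact_mod_cast this
          have hx0 : 0 ≤ x :=
            (pvDP_bound a v (t+1) (t+1) x (by rw [pvDP_getD_last]; exact hf)).1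
          refine ⟨x.toNat, by omega, ?_⟩
          congr 1
          omega
    · exact absurd hp (by simp)

-- ---- the invariant: B's prefix minima equal the canonical prefix minima ----
theorem pvDB_take (v arr : List Int) : ∀ t, t ≤ arr.length →
    (arr.take t).foldl (pvStepC v) [some (-1)] = pvDB v arr t := by
  intro t
  induction t with
  | zero => intro _; rfl
  | succ t ih =>
    intro ht
    have hel : arr[t]? = some (arr.getD t 0) := by
      rw [List.getElem?_eq_getElem (by omega), List.getD_eq_getElem _ _ (by omega)]
    rw [List.take_add_one, hel]
    simp only [Option.toList]
    rw [List.foldl_append, ih (by omega)]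
    rfl

theorem pvInv (arr v : List Int) (hv : v.Pairwise (· < ·)) :
    ∀ t c, pvPmB (pvDB v arr t) c = pvPmC v (-1 :: arr) (pvDP (-1 :: arr) v t) t c := by
  intro t
  induction t with
  | zero =>
    intro c
    have hL : ∀ i : Nat, pvW (([some (-1)] : List (Option Int)).getD i none)
        = if i = 0 then ((-1 : Int) : WithTop Int) else ⊤ := by
      intro i
      match i with
      | 0 => rw [if_pos rfl]; rfl
      | i+1 => rw [if_neg (by omega)]; rfl
    have hR : ∀ c' : Nat, pvC v (-1 :: arr) (pvDP (-1 :: arr) v 0) 0 c'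
        = if c' = 0 then ((-1 : Int) : WithTop Int) else ⊤ := by
      intro c'
      unfold pvC
      rw [Finset.range_one, Finset.inf_singleton]
      unfold pvContrib pvOps
      rw [show pvDP (-1 :: arr) v 0 = [some 0] from rfl]
      by_cases hc : c' = 0
      · subst hc
        rw [if_pos (by simp), if_pos rfl]
        rfl
      · rw [if_neg (by
              rw [show ([some (0:Int)].getD 0 none) = some (0:Int) from rfl]
              rw [Option.map_some, Option.some.injEq]
              intro h
              apply hc
              have h2 : ((0 : Nat) : Int) = (c' : Int) := by simpa using h
              omega),
            if_neg hc]
    have h1 : pvPmB (pvDB v arr 0) c = ((-1 : Int) : WithTop Int) := by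
      unfold pvPmB
      rw [show pvDB v arr 0 = [some (-1)] from rfl,
          Finset.inf_congr rfl (fun i _ => hL i),
          pvInfIf c (fun i => i = 0) _, if_pos ⟨0, by omega, rfl⟩]
    have h2 : pvPmC v (-1 :: arr) (pvDP (-1 :: arr) v 0) 0 c = ((-1 : Int) : WithTop Int) := by
      unfold pvPmC
      rw [Finset.inf_congr rfl (fun c' _ => hR c'),
          pvInfIf c (fun i => i = 0) _, if_pos ⟨0, by omega, rfl⟩]
    rw [h1, h2]
  | succ t ih =>
    intro c
    have hnum : (-1 :: arr).getD (t+1) 0 = arr.getD t 0 := rfl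
    rw [show pvDB v arr (t+1) = pvStepC v (pvDB v arr t) (arr.getD t 0) from rfl,
        pvPmB_step v (hv.imp (fun h => le_of_lt h)) _ _ c,
        pvPmC_step v (-1 :: arr) (hv.imp (fun h => le_of_lt h)) t c, hnum]
    congr 1
    · rw [ih c]
      have hlink := pvKeepLink v (-1 :: arr) hv t c
      rw [hnum] at hlink
      exact if_congr hlink.symm rfl rfl
    · by_cases h1c : 1 ≤ c
      · rw [if_pos h1c, if_pos h1c, ih (c-1)]
      · rw [if_neg h1c, if_neg h1c]

-- ---- the final answers of both programs ----
def pvE (a v : List Int) (d : List (Option Int)) (p : Nat) : Option Int :=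
  if pvKey v (a.getD p 0) (a.length - 1 - p) = none then none
  else pvOps d (a.length - 1) p

theorem pvFin_eq (a v : List Int) (hv : v.Pairwise (· < ·)) (d : List (Option Int)) :
    pvFinB a v d = (List.range a.length).foldl (fun c p => pvMinO c (pvE a v d p)) none := by
  unfold pvFinB
  apply PySem.List.foldl_congr_mem
  intro ans p hp
  rw [List.mem_range] at hp
  cases hd : d.getD p none with
  | none =>
    have hE : pvE a v d p = none := by
      unfold pvE pvOps
      rw [hd]
      simp
    rw [hE, pvMinO_none_right]
  | some c0 =>
    dsimp only
    have hbr := (PySem.List.bisectRight_spec v (a.getD p 0) (hv.imp (fun h => le_of_lt h))).1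
    by_cases hg : a.length - 1 - p = 0
    · rw [if_pos (by omega), pvMinO_match]
      have hE : pvE a v d p = some (c0 + ((a.length - 1 - p : Nat) : Int)) := by
        unfold pvE pvOps
        rw [hg, hd]
        simp [pvKey]
      rw [hE, hg]
    · by_cases hcond : PySem.List.bisectRight v (a.getD p 0) + (a.length - 1 - p) ≤ v.length
      · rw [if_pos (by omega), pvMinO_match]
        have hE : pvE a v d p = some (c0 + ((a.length - 1 - p : Nat) : Int)) := by
          unfold pvE pvOps
          rw [pvKey_eq v hv _ _ (by omega), if_pos hcond, hd]
          simp
        rw [hE]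
      · rw [if_neg (by omega)]
        have hE : pvE a v d p = none := by
          unfold pvE pvOps
          rw [pvKey_eq v hv _ _ (by omega), if_neg hcond]
          simp
        rw [hE, pvMinO_none_right]

theorem pvFirstSome_allNone : ∀ (L : List (Option Int)) (s : Int),
    (∀ c : Nat, L.getD c none = none) → pvFirstSome L s = -1 := by
  intro L
  induction L with
  | nil => intro s _; rfl
  | cons hd tl ih =>
    intro s h
    cases hhd : hd with
    | some x => exact absurd (h 0) (by rw [show (hd :: tl).getD 0 none = hd from rfl, hhd]; simp)
    | none =>
      show pvFirstSome tl (s + 1) = -1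
      exact ih (s+1) (fun c => h (c+1))

theorem pvFirstSome_at : ∀ (c0 : Nat) (L : List (Option Int)) (s : Int),
    (∀ c, c < c0 → L.getD c none = none) → L.getD c0 none ≠ none →
    pvFirstSome L s = s + (c0 : Int) := by
  intro c0
  induction c0 with
  | zero =>
    intro L s _ h0
    cases L with
    | nil => exact (h0 rfl).elim
    | cons hd tl =>
      cases hhd : hd with
      | none => exact (h0 (by rw [show (hd :: tl).getD 0 none = hd from rfl, hhd])).elim
      | some x => show s = s + ((0:Nat) : Int); simp
  | succ c0 ih =>
    intro L s hlt h0
    cases L with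
    | nil => exact (h0 rfl).elim
    | cons hd tl =>
      have hhd : hd = none := hlt 0 (by omega)
      subst hhd
      show pvFirstSome tl (s + 1) = s + ((c0 + 1 : Nat) : Int)
      rw [ih tl (s+1) (fun c hc => hlt (c+1) (by omega)) h0]
      push_cast
      ring

-- ---- A's result in canonical form (reusing the old pairwise rewriting) ----
theorem pvA_eq (arr1 arr2 : List Int) :
    makeArrayIncreasing arr1 arr2
      = (match pvFinB (-1 :: arr1) (PySem.List.sorted (PySem.Set.ofList arr2) (fun x => x))
            (pvDP (-1 :: arr1) (PySem.List.sorted (PySem.Set.ofList arr2) (fun x => x)) arr1.length) with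
         | some x => x
         | none => -1) := by
  unfold makeArrayIncreasing
  have hv : (PySem.List.sorted (PySem.Set.ofList arr2) (fun x => x)).Pairwise (· ≤ ·) :=
    (PySem.List.sorted_ofList_pairwise_lt arr2).imp (fun h => le_of_lt h)
  have hA : some (-1) :: (arr1.map some ++ [(none : Option Int)])
      = ((-1 :: arr1).map some ++ [(none : Option Int)]) := by simp
  rw [hA]
  dsimp only
  have hlen : (((-1 :: arr1).map some ++ [(none : Option Int)])).length = arr1.length + 1 + 1 := by
    simp
  rw [hlen]
  simp only [Nat.add_sub_cancel]
  rw [List.range_succ, List.foldl_append]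
  have hpre : (List.range arr1.length).foldl
        (pvStepA ((-1 :: arr1).map some ++ [(none : Option Int)])
          (PySem.List.sorted (PySem.Set.ofList arr2) (fun x => x))) [some 0]
      = (List.range arr1.length).foldl
          (pvStepB (-1 :: arr1) (PySem.List.sorted (PySem.Set.ofList arr2) (fun x => x))) [some 0] :=
    PySem.List.foldl_congr_mem _ _ _ _ (fun dp i0 hi0 =>
      pvStepM (-1 :: arr1) _ hv dp i0 (by rw [List.mem_range] at hi0; simp; omega))
  rw [hpre]
  simp only [List.foldl_cons, List.foldl_nil]
  rw [show arr1.length = (-1 :: arr1).length - 1 from by simp]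
  rw [pvStepF (-1 :: arr1) _ hv _ (by simp)]
  rw [List.getLast?_concat]
  rw [show ((-1 : Int) :: arr1).length - 1 = arr1.length from by simp]
  rw [show (List.range arr1.length).foldl
        (pvStepB (-1 :: arr1) (PySem.List.sorted (PySem.Set.ofList arr2) (fun x => x))) [some 0]
      = pvDP (-1 :: arr1) (PySem.List.sorted (PySem.Set.ofList arr2) (fun x => x)) arr1.length from rfl]
  cases pvFinB (-1 :: arr1) (PySem.List.sorted (PySem.Set.ofList arr2) (fun x => x))
      (pvDP (-1 :: arr1) (PySem.List.sorted (PySem.Set.ofList arr2) (fun x => x)) arr1.length) <;> rfl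

-- ---- main comparison of the two final answers ----
theorem pvMain (arr1 v : List Int) (hv : v.Pairwise (· < ·)) :
    (match pvFinB (-1 :: arr1) v (pvDP (-1 :: arr1) v arr1.length) with
     | some x => x
     | none => -1) = pvFirstSome (pvDB v arr1 arr1.length) 0 := by
  have hInv := pvInv arr1 v hv
  have hlen : ((-1 : Int) :: arr1).length = arr1.length + 1 := by simp
  have hW : pvW (pvFinB (-1 :: arr1) v (pvDP (-1 :: arr1) v arr1.length))
      = (Finset.range ((-1 :: arr1).length)).inf
          (fun p => pvW (pvE (-1 :: arr1) v (pvDP (-1 :: arr1) v arr1.length) p)) := by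
    rw [pvFin_eq (-1 :: arr1) v hv _]
    exact pvWfold _ _
  cases hfin : pvFinB (-1 :: arr1) v (pvDP (-1 :: arr1) v arr1.length) with
  | none =>
    have hallE : ∀ p, p < arr1.length + 1
        → pvW (pvE (-1 :: arr1) v (pvDP (-1 :: arr1) v arr1.length) p) = ⊤ := by
      intro p hp
      have htop : (Finset.range ((-1 :: arr1).length)).inf
          (fun p => pvW (pvE (-1 :: arr1) v (pvDP (-1 :: arr1) v arr1.length) p)) = ⊤ := by
        rw [← hW, hfin]
        rfl
      exact (Finset.inf_eq_top_iff _ _).mp htop p (by rw [Finset.mem_range, hlen]; omega)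
    have hC : ∀ c, pvC v (-1 :: arr1) (pvDP (-1 :: arr1) v arr1.length) arr1.length c = ⊤ := by
      intro c
      unfold pvC
      rw [Finset.inf_eq_top_iff]
      intro p hpmem
      rw [Finset.mem_range] at hpmem
      unfold pvContrib
      split
      · next hops =>
        cases hk : pvKey v (((-1 : Int) :: arr1).getD p 0) (arr1.length - p) with
        | none => rfl
        | some k =>
          exfalso
          have hE := hallE p (by omega)
          unfold pvE at hE
          rw [show ((-1 : Int) :: arr1).length - 1 - p = arr1.length - p from by
                rw [hlen]; omega, hk] at hE
          rw [if_neg (by simp)] at hE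
          have hE2 : pvOps (pvDP (-1 :: arr1) v arr1.length) arr1.length p = none := by
            have h3 := (pvW_top _).mp hE
            rwa [show ((-1 : Int) :: arr1).length - 1 = arr1.length from by rw [hlen]; omega] at h3
          rw [hE2] at hops
          exact absurd hops (by simp)
      · rfl
    have hBnone : ∀ c : Nat, (pvDB v arr1 arr1.length).getD c none = none := by
      intro c
      have h1 : pvPmB (pvDB v arr1 arr1.length) c = ⊤ := by
        rw [hInv arr1.length c]
        unfold pvPmC
        rw [Finset.inf_eq_top_iff]
        exact fun c' _ => hC c'
      have hle : pvPmB (pvDB v arr1 arr1.length) c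
          ≤ pvW ((pvDB v arr1 arr1.length).getD c none) :=
        Finset.inf_le (by rw [Finset.mem_range]; omega)
      rw [h1] at hle
      exact (pvW_top _).mp (top_unique hle)
    rw [pvFirstSome_allNone _ 0 hBnone]
  | some o =>
    obtain ⟨p, hpmem, hpeq⟩ := Finset.exists_mem_eq_inf (Finset.range ((-1 :: arr1).length))
        ⟨0, by simp⟩ (fun p => pvW (pvE (-1 :: arr1) v (pvDP (-1 :: arr1) v arr1.length) p))
    rw [Finset.mem_range, hlen] at hpmem
    have hEp : pvW (pvE (-1 :: arr1) v (pvDP (-1 :: arr1) v arr1.length) p)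
        = ((o : Int) : WithTop Int) := by
      rw [← hpeq, ← hW, hfin]
      rfl
    have hEps : pvE (-1 :: arr1) v (pvDP (-1 :: arr1) v arr1.length) p = some o := by
      cases hE : pvE (-1 :: arr1) v (pvDP (-1 :: arr1) v arr1.length) p with
      | none => rw [hE] at hEp; exact absurd hEp (by simp [pvW])
      | some y =>
        rw [hE] at hEp
        have h2 : ((y : Int) : WithTop Int) = ((o : Int) : WithTop Int) := hEp
        have : y = o := by exact_mod_cast h2
        rw [this]
    have hkey : pvKey v (((-1 : Int) :: arr1).getD p 0) (arr1.length - p) ≠ none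
        ∧ pvOps (pvDP (-1 :: arr1) v arr1.length) arr1.length p = some o := by
      unfold pvE at hEps
      rw [show ((-1 : Int) :: arr1).length - 1 - p = arr1.length - p from by
            rw [hlen]; omega] at hEps
      split at hEps
      · exact absurd hEps (by simp)
      · next hne =>
        refine ⟨hne, ?_⟩
        rw [show ((-1 : Int) :: arr1).length - 1 = arr1.length from by rw [hlen]; omega] at hEps
        exact hEps
    obtain ⟨y, hy, hyo⟩ : ∃ y, (pvDP (-1 :: arr1) v arr1.length).getD p none = some y
        ∧ o = y + ((arr1.length - p : Nat) : Int) := by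
      have h2 := hkey.2
      unfold pvOps at h2
      cases hd : (pvDP (-1 :: arr1) v arr1.length).getD p none with
      | none => rw [hd] at h2; exact absurd h2 (by simp)
      | some y =>
        rw [hd] at h2
        rw [Option.map_some, Option.some.injEq] at h2
        exact ⟨y, rfl, h2.symm⟩
    have hyb := pvDP_bound (-1 :: arr1) v arr1.length p y hy
    have hcast : ((arr1.length - p : Nat) : Int) = (arr1.length : Int) - p := by omega
    have ho0 : 0 ≤ o := by omega
    have hoc0 : o = ((o.toNat : Nat) : Int) := by omega
    have hCc0 : pvC v (-1 :: arr1) (pvDP (-1 :: arr1) v arr1.length) arr1.length o.toNat ≠ ⊤ := by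
      intro htop
      have hc := (Finset.inf_eq_top_iff _ _).mp htop p (by rw [Finset.mem_range]; omega)
      unfold pvContrib at hc
      rw [if_pos (by rw [hkey.2]; exact congrArg some hoc0)] at hc
      exact hkey.1 ((pvW_top _).mp hc)
    have hClt : ∀ c, c < o.toNat
        → pvC v (-1 :: arr1) (pvDP (-1 :: arr1) v arr1.length) arr1.length c = ⊤ := by
      intro c hc
      unfold pvC
      rw [Finset.inf_eq_top_iff]
      intro q hqmem
      rw [Finset.mem_range] at hqmem
      unfold pvContrib
      split
      · next hops =>
        cases hk : pvKey v (((-1 : Int) :: arr1).getD q 0) (arr1.length - q) with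
        | none => rfl
        | some k =>
          exfalso
          have hEq : pvE (-1 :: arr1) v (pvDP (-1 :: arr1) v arr1.length) q
              = some ((c : Nat) : Int) := by
            unfold pvE
            rw [show ((-1 : Int) :: arr1).length - 1 - q = arr1.length - q from by
                  rw [hlen]; omega, hk, if_neg (by simp),
                show ((-1 : Int) :: arr1).length - 1 = arr1.length from by rw [hlen]; omega]
            exact hops
          have hle2 : ((o : Int) : WithTop Int) ≤ (((c : Nat) : Int) : WithTop Int) := by
            rw [show ((o : Int) : WithTop Int)
                = pvW (pvFinB (-1 :: arr1) v (pvDP (-1 :: arr1) v arr1.length)) from by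
                  rw [hfin]; rfl, hW]
            calc (Finset.range ((-1 :: arr1).length)).inf
                  (fun p => pvW (pvE (-1 :: arr1) v (pvDP (-1 :: arr1) v arr1.length) p))
                ≤ pvW (pvE (-1 :: arr1) v (pvDP (-1 :: arr1) v arr1.length) q) :=
                  Finset.inf_le (by rw [Finset.mem_range, hlen]; omega)
              _ = (((c : Nat) : Int) : WithTop Int) := by rw [hEq]; rfl
          have : (o : Int) ≤ ((c : Nat) : Int) := by exact_mod_cast hle2
          omega
      · rfl
    have hBnone : ∀ c, c < o.toNat → (pvDB v arr1 arr1.length).getD c none = none := by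
      intro c hc
      have h1 : pvPmB (pvDB v arr1 arr1.length) c = ⊤ := by
        rw [hInv arr1.length c]
        unfold pvPmC
        rw [Finset.inf_eq_top_iff]
        intro c' hc'
        rw [Finset.mem_range] at hc'
        exact hClt c' (by omega)
      have hle : pvPmB (pvDB v arr1 arr1.length) c
          ≤ pvW ((pvDB v arr1 arr1.length).getD c none) :=
        Finset.inf_le (by rw [Finset.mem_range]; omega)
      rw [h1] at hle
      exact (pvW_top _).mp (top_unique hle)
    have hBc0 : (pvDB v arr1 arr1.length).getD o.toNat none ≠ none := by
      intro hnone
      have hPm : pvPmB (pvDB v arr1 arr1.length) o.toNat = ⊤ := by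
        unfold pvPmB
        rw [Finset.inf_eq_top_iff]
        intro c' hc'
        rw [Finset.mem_range] at hc'
        by_cases h : c' < o.toNat
        · rw [hBnone c' h]; rfl
        · rw [show c' = o.toNat from by omega, hnone]; rfl
      rw [hInv arr1.length o.toNat] at hPm
      have hle : pvPmC v (-1 :: arr1) (pvDP (-1 :: arr1) v arr1.length) arr1.length o.toNat
          ≤ pvC v (-1 :: arr1) (pvDP (-1 :: arr1) v arr1.length) arr1.length o.toNat :=
        Finset.inf_le (by rw [Finset.mem_range]; omega)
      rw [hPm] at hle
      exact hCc0 (top_unique hle)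
    rw [pvFirstSome_at o.toNat _ 0 hBnone hBc0]
    show o = 0 + ((o.toNat : Nat) : Int)
    omega

-- ===== VERDICT (by name: the statement is the Claim_ definition above) =====
theorem makeArrayIncreasing_spec : Claim_equal_makeArrayIncreasing := by
  intro arr1 arr2 _
  unfold Spec_makeArrayIncreasing
  have hv : (PySem.List.sorted (PySem.Set.ofList arr2) (fun x => x)).Pairwise (· < ·) :=
    PySem.List.sorted_ofList_pairwise_lt arr2
  rw [pvA_eq arr1 arr2, pvMain arr1 _ hv]
  unfold makeArrayIncreasing_alt
  have htake := pvDB_take (PySem.List.sorted (PySem.Set.ofList arr2) (fun x => x)) arr1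
      arr1.length (le_refl _)
  rw [List.take_length] at htake
  exact congrArg (fun L => pvFirstSome L 0) htake.symm
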